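-- pv_equiv track=rewrite | github.com/MonashBioinformaticsPlatform/RSeQC | rseqc/qcmodule/bam_cigar.py | fetch_deletion_range
-- ===== SOURCE A (Python) =====
-- def fetch_deletion_range(cigar):
-- 	''' fetch deletion regions defined by cigar. st must be zero based
-- 	return list of tuple of (st, end). 'st','end' is relative to the
-- 	start of read.
-- 	'''
-- 	del_bound =[]
-- 	st = 0
-- 	for c,s in cigar:	#code and size
-- 		if c==0:		#match
-- 			st += s
-- 		elif c==4:
-- 			st += s		#soft clip
-- 		elif c==1:		#insertion to ref
-- 			st += s
-- 		elif c==2:		#deletion to ref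
-- 			del_bound.append((st,s))	#only record the start position of deletion, and the deletion size
-- 		elif c==3:		#gap or intron
-- 			continue
-- 		else:
-- 			continue
-- 	return del_bound
-- ===== SOURCE B (Python) =====
-- def fetch_deletion_range(cigar):
--     # total read length consumed by match/insert/soft-clip ops
--     total = sum(s for c, s in cigar if c in (0, 1, 4))
--     out = []
--     suf = 0  # read length consumed by the suffix already scanned (reverse order)
--     for c, s in reversed(cigar):
--         if c == 2:
--             out.append((total - suf, s))
--         elif c in (0, 1, 4):
--             suf += s
--     out.reverse()
--     return out
-- ===== Notes on version B (the rewrite author's own statement) =====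
-- stated objective: alternative
-- what changed: B scans the cigar in reverse: it precomputes the total read-consumed length, maintains a suffix-consumed counter, emits each deletion start as total minus that suffix, and builds the output back-to-front (reversed at the end), instead of A's forward pass with a running prefix offset.
import Mathlib
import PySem

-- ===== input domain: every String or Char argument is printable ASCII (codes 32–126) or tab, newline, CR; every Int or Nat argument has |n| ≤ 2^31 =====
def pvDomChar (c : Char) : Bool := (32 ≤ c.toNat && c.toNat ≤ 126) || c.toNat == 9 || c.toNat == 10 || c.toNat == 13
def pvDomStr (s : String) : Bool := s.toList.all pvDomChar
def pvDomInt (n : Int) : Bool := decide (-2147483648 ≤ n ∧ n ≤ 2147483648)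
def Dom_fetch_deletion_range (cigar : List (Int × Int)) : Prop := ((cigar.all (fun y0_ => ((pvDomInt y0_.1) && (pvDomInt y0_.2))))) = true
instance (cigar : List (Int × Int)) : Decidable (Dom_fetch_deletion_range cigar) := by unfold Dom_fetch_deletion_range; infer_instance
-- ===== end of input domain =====

-- B computes the same deletion ranges by a reverse scan (total consumed length minus a suffix counter, output built back-to-front) instead of A's forward running-offset loop (alternative decomposition; return value only).

-- ===== PORT A =====
-- literal transliteration of A's forward loop: state = (st, del_bound)
def fetch_deletion_range (cigar : List (Int × Int)) : List (Int × Int) :=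
  (cigar.foldl (fun (acc : Int × List (Int × Int)) cs =>
      if cs.1 = 0 then (acc.1 + cs.2, acc.2)
      else if cs.1 = 4 then (acc.1 + cs.2, acc.2)
      else if cs.1 = 1 then (acc.1 + cs.2, acc.2)
      else if cs.1 = 2 then (acc.1, acc.2 ++ [(acc.1, cs.2)])
      else acc)
    (0, [])).2

-- ===== PORT B =====
-- Source B: total = sum of consuming sizes; reverse loop with state (out, suf); out.reverse() at the end
def fetch_deletion_range_alt (cigar : List (Int × Int)) : List (Int × Int) :=
  let total : Int := cigar.foldl (fun t cs => if cs.1 = 0 ∨ cs.1 = 1 ∨ cs.1 = 4 then t + cs.2 else t) 0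
  let res := cigar.reverse.foldl
      (fun (acc : List (Int × Int) × Int) cs =>
        if cs.1 = 2 then (acc.1 ++ [(total - acc.2, cs.2)], acc.2)
        else if cs.1 = 0 ∨ cs.1 = 1 ∨ cs.1 = 4 then (acc.1, acc.2 + cs.2)
        else acc)
      ([], 0)
  res.1.reverse

-- ===== PRECONDITION & SPEC =====
def Spec_fetch_deletion_range (cigar : List (Int × Int)) (out : List (Int × Int)) : Prop := out = fetch_deletion_range_alt cigar
instance (cigar : List (Int × Int)) (out : List (Int × Int)) : Decidable (Spec_fetch_deletion_range cigar out) := by unfold Spec_fetch_deletion_range; infer_instance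

-- ===== CLAIM (what is proved, stated in full; the proofs are below) =====
def Claim_equal_fetch_deletion_range : Prop := ∀ (cigar : List (Int × Int)), Dom_fetch_deletion_range cigar → Spec_fetch_deletion_range cigar (fetch_deletion_range cigar)

-- ===== LEMMAS AND PROOFS =====

-- the deletion ranges of a cigar, starts relative to its own beginning (reference function for both ports)
def pvG : List (Int × Int) → List (Int × Int)
  | [] => []
  | (c, s) :: tl =>
      if c = 2 then (0, s) :: pvG tl
      else if c = 0 ∨ c = 1 ∨ c = 4 then (pvG tl).map (fun p => (p.1 + s, p.2))
      else pvG tl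

-- total read length consumed by a cigar
def pvC : List (Int × Int) → Int
  | [] => 0
  | (c, s) :: tl => (if c = 0 ∨ c = 1 ∨ c = 4 then s else 0) + pvC tl

-- A's fold from state (st, db) yields db ++ pvG shifted by st
lemma pvA_inv (cigar : List (Int × Int)) : ∀ (st : Int) (db : List (Int × Int)),
    (cigar.foldl (fun (acc : Int × List (Int × Int)) cs =>
      if cs.1 = 0 then (acc.1 + cs.2, acc.2)
      else if cs.1 = 4 then (acc.1 + cs.2, acc.2)
      else if cs.1 = 1 then (acc.1 + cs.2, acc.2)
      else if cs.1 = 2 then (acc.1, acc.2 ++ [(acc.1, cs.2)])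
      else acc) (st, db)).2
    = db ++ (pvG cigar).map (fun p => (st + p.1, p.2)) := by
  induction cigar with
  | nil => simp [pvG]
  | cons hd tl ih =>
    intro st db
    obtain ⟨c, s⟩ := hd
    by_cases h0 : c = 0
    · simp [h0, pvG, ih, add_comm, add_left_comm]
    · by_cases h4 : c = 4
      · simp [h4, pvG, ih, add_comm, add_left_comm]
      · by_cases h1 : c = 1
        · simp [h1, pvG, ih, add_comm, add_left_comm]
        · by_cases h2 : c = 2
          · simp [h2, pvG, ih]
          · simp [h0, h1, h2, h4, pvG, ih]

-- B's total accumulator equals pvC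
lemma pvTotal_eq (cigar : List (Int × Int)) : ∀ (t : Int),
    cigar.foldl (fun t cs => if cs.1 = 0 ∨ cs.1 = 1 ∨ cs.1 = 4 then t + cs.2 else t) t
      = t + pvC cigar := by
  induction cigar with
  | nil => simp [pvC]
  | cons hd tl ih =>
    intro t
    obtain ⟨c, s⟩ := hd
    by_cases h : c = 0 ∨ c = 1 ∨ c = 4
    · simp [h, pvC, ih, add_assoc]
    · simp [h, pvC, ih]

-- B's reverse loop (written as a foldr) computes pvG's entries, shifted and reversed, plus pvC
lemma pvB_inv (total : Int) (cigar : List (Int × Int)) :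
    cigar.foldr (fun cs (acc : List (Int × Int) × Int) =>
        if cs.1 = 2 then (acc.1 ++ [(total - acc.2, cs.2)], acc.2)
        else if cs.1 = 0 ∨ cs.1 = 1 ∨ cs.1 = 4 then (acc.1, acc.2 + cs.2)
        else acc) ([], 0)
    = (((pvG cigar).map (fun p => (total - pvC cigar + p.1, p.2))).reverse, pvC cigar) := by
  induction cigar with
  | nil => simp [pvG, pvC]
  | cons hd tl ih =>
    obtain ⟨c, s⟩ := hd
    by_cases h2 : c = 2
    · simp [h2, pvG, pvC, ih]
    · by_cases h : c = 0 ∨ c = 1 ∨ c = 4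
      · simp [h2, h, pvG, pvC, ih, List.map_map, Function.comp]
        constructor
        · intro a b _; ring
        · ring
      · simp [h2, h, pvG, pvC, ih]

-- ===== VERDICT (by name: the statement is the Claim_ definition above) =====
theorem fetch_deletion_range_spec : Claim_equal_fetch_deletion_range := by
  intro cigar _
  show fetch_deletion_range cigar = fetch_deletion_range_alt cigar
  unfold fetch_deletion_range fetch_deletion_range_alt
  simp only [List.foldl_reverse, pvTotal_eq, zero_add, pvB_inv, List.reverse_reverse, sub_self]
  simpa using pvA_inv cigar 0 []
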